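-- pv_equiv track=rewrite | github.com/jiteshpubreja/adventofcode | 2023/day-2.1.py | check_cubes
-- ===== SOURCE A (Python) =====
-- def check_cubes(games_data):
--
--   game_result = { "red":0, "green":0, "blue":0 }
--   for game_data in games_data.split(";"):
--     for x in game_data.split(","):
--       x = x.strip()
--       if x:
--         cnt,col = x.split()
--         game_result[col] = max(int(cnt),game_result[col])
--   return game_result["red"] <= 12 and game_result["green"] <= 13 and game_result["blue"] <= 14
-- ===== SOURCE B (Python) =====
-- def check_cubes(games_data):
--   tokens = [t.strip() for part in games_data.split(";") for t in part.split(",")]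
--   pairs = [(col, int(cnt)) for cnt, col in (t.split() for t in tokens if t)]
--   return all(max((n for c, n in pairs if c == col), default=0) <= limit
--              for col, limit in (("red", 12), ("green", 13), ("blue", 14)))
-- ===== Notes on version B (the rewrite author's own statement) =====
-- stated objective: alternative
-- what changed: B replaces A's single accumulating pass with a running per-color max dict by staged passes: flatten and strip all tokens, parse them into a (color,count) list, then for each of the three colors compute its max independently with max(..., default=0) and compare against the limit; no state is carried across draws.
import Mathlib
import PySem

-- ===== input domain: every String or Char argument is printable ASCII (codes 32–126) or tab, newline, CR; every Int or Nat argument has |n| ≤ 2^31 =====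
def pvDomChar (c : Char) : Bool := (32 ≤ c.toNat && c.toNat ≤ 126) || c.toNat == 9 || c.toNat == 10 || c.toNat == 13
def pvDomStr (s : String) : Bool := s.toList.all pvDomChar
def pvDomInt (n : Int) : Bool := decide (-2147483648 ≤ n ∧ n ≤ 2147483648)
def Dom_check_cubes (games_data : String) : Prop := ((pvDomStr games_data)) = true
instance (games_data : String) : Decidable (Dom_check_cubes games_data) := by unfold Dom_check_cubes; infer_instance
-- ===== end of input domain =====

-- B replaces A's single accumulating pass (running per-color max dict) by staged passes:
-- flatten+strip all tokens, parse them into a (color,count) list, then compute each color's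
-- maximum independently and compare it to the limit; equivalence is about the return value.

-- ===== PORT A =====
-- A's inner loop body: x = x.strip(); if x: cnt,col = x.split(); game_result[col] = max(int(cnt), game_result[col])
def pvStepA (gr : PySem.Dict String Int) (x : String) : PySem.Dict String Int :=
  let x := PySem.Str.strip x
  if x ≠ "" then
    match PySem.Str.split₀ x with
    | [cnt, col] => gr.insert col (max ((PySem.Int.ofStr? cnt).getD 0) (gr.getD col 0))
    | _ => gr      -- Python raises ValueError here (unpacking); excluded by Pre_
  else gr

def check_cubes (games_data : String) : Bool :=
  let gr := ((PySem.Str.split? games_data ";").getD []).foldl (fun gr game_data =>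
    ((PySem.Str.split? game_data ",").getD []).foldl pvStepA gr)
    (PySem.Dict.ofList [("red", 0), ("green", 0), ("blue", 0)])
  decide (gr.getD "red" 0 ≤ 12 ∧ gr.getD "green" 0 ≤ 13 ∧ gr.getD "blue" 0 ≤ 14)

-- ===== PORT B =====
-- (cnt, col) from a stripped nonempty token t: cnt,col = t.split(); (col, int(cnt))
def pvParseB (t : String) : String × Int :=
  let w := PySem.Str.split₀ t
  (w.getD 1 "", (PySem.Int.ofStr? (w.getD 0 "")).getD 0)   -- len(w) ≠ 2 / bad int raise in Python; excluded by Pre_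

def check_cubes_alt (games_data : String) : Bool :=
  let tokens := ((PySem.Str.split? games_data ";").getD []).flatMap (fun part =>
    ((PySem.Str.split? part ",").getD []).map PySem.Str.strip)
  let pairs := (tokens.filter (fun t => t ≠ "")).map pvParseB
  ([("red", (12 : Int)), ("green", 13), ("blue", 14)]).all (fun cl =>
    decide (PySem.List.maxD (pairs.filterMap (fun p => if p.1 == cl.1 then some p.2 else none)) id 0 ≤ cl.2))

-- ===== PRECONDITION & SPEC =====
-- Pre_ excludes exactly the inputs on which the Python A raises: a nonempty token that does not
-- split into exactly two words (ValueError), whose count is not an int literal (ValueError), or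
-- whose color is not red/green/blue (KeyError).
def Pre_check_cubes (games_data : String) : Prop :=
  ∀ part ∈ (PySem.Str.split? games_data ";").getD [], ∀ x ∈ (PySem.Str.split? part ",").getD [],
    PySem.Str.strip x ≠ "" →
      ((PySem.Str.split₀ (PySem.Str.strip x)).length = 2 ∧
       (PySem.Int.ofStr? ((PySem.Str.split₀ (PySem.Str.strip x)).getD 0 "")).isSome = true ∧
       (PySem.Str.split₀ (PySem.Str.strip x)).getD 1 "" ∈ (["red", "green", "blue"] : List String))
instance (games_data : String) : Decidable (Pre_check_cubes games_data) := by
  unfold Pre_check_cubes; infer_instance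
def pvWitness_check_cubes : String := "3 blue, 4 red; 1 red, 2 green"

def Spec_check_cubes (games_data : String) (out : Bool) : Prop := out = check_cubes_alt games_data
instance (games_data : String) (out : Bool) : Decidable (Spec_check_cubes games_data out) := by unfold Spec_check_cubes; infer_instance

-- ===== CLAIM (what is proved, stated in full; the proofs are below) =====
def Claim_equal_check_cubes : Prop := ∀ (games_data : String), Dom_check_cubes games_data → Pre_check_cubes games_data → Spec_check_cubes games_data (check_cubes games_data)

-- ===== LEMMAS AND PROOFS =====

-- the flat stripped token list, and the per-color count list B effectively reduces
def pvToks (s : String) : List String :=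
  ((PySem.Str.split? s ";").getD []).flatMap (fun part =>
    ((PySem.Str.split? part ",").getD []).map PySem.Str.strip)

def pvCounts (col : String) (T : List String) : List Int :=
  (T.filter (fun t => t ≠ "")).filterMap (fun t =>
    (fun p => if p.1 == col then some p.2 else none) (pvParseB t))

-- a stripped token is either empty or splits into exactly two words
def pvWf (t : String) : Prop :=
  t ≠ "" → ∃ a b, PySem.Str.split₀ t = [a, b]

-- A's step seen on the already-stripped token
def pvStepA' (gr : PySem.Dict String Int) (t : String) : PySem.Dict String Int :=
  if t ≠ "" then
    match PySem.Str.split₀ t with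
    | [cnt, col] => gr.insert col (max ((PySem.Int.ofStr? cnt).getD 0) (gr.getD col 0))
    | _ => gr
  else gr

lemma pvFoldlMax_le_iff (ns : List Int) (a L : Int) :
    ns.foldl max a ≤ L ↔ (a ≤ L ∧ ∀ n ∈ ns, n ≤ L) := by
  induction ns generalizing a with
  | nil => simp
  | cons x xs ih =>
    simp only [List.foldl_cons, ih, max_le_iff, List.mem_cons]
    constructor
    · rintro ⟨⟨h1, h2⟩, h3⟩
      exact ⟨h1, fun n hn => by rcases hn with rfl | hn; exact h2; exact h3 n hn⟩
    · rintro ⟨h1, h2⟩; exact ⟨⟨h1, h2 x (Or.inl rfl)⟩, fun n hn => h2 n (Or.inr hn)⟩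

lemma pvMax?Cons_le_iff (ns : List Int) (m L : Int) :
    ((PySem.List.max? (m :: ns) id).getD 0 ≤ L) ↔ (m ≤ L ∧ ∀ n ∈ ns, n ≤ L) := by
  induction ns generalizing m with
  | nil => simp [PySem.List.max?]
  | cons x xs ih =>
    have hstep : PySem.List.max? (m :: x :: xs) id
        = PySem.List.max? ((if m < x then x else m) :: xs) id := by
      by_cases h : m < x <;> simp [PySem.List.max?, h]
    rw [hstep, ih]
    simp only [List.mem_cons]
    by_cases h : m < x
    · rw [if_pos h]
      constructor
      · rintro ⟨h1, h2⟩
        exact ⟨le_trans (le_of_lt h) h1,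
          fun n hn => by rcases hn with rfl | hn; exact h1; exact h2 n hn⟩
      · rintro ⟨h1, h2⟩; exact ⟨h2 x (Or.inl rfl), fun n hn => h2 n (Or.inr hn)⟩
    · rw [if_neg h]
      replace h : x ≤ m := le_of_not_gt h
      constructor
      · rintro ⟨h1, h2⟩
        exact ⟨h1, fun n hn => by rcases hn with rfl | hn; exact le_trans h h1; exact h2 n hn⟩
      · rintro ⟨h1, h2⟩; exact ⟨h1, fun n hn => h2 n (Or.inr hn)⟩

lemma pvMaxD_le_iff (ns : List Int) (L : Int) (hL : 0 ≤ L) :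
    PySem.List.maxD ns id 0 ≤ L ↔ ∀ n ∈ ns, n ≤ L := by
  cases ns with
  | nil => simpa [PySem.List.maxD, PySem.List.max?] using hL
  | cons x xs =>
    have : PySem.List.maxD (x :: xs) id 0 = (PySem.List.max? (x :: xs) id).getD 0 := rfl
    rw [this, pvMax?Cons_le_iff]
    simp only [List.mem_cons]
    constructor
    · rintro ⟨h1, h2⟩ n hn; rcases hn with rfl | hn; exact h1; exact h2 n hn
    · intro h; exact ⟨h x (Or.inl rfl), fun n hn => h n (Or.inr hn)⟩

lemma pvCounts_cons_empty (col : String) (T : List String) :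
    pvCounts col ("" :: T) = pvCounts col T := by
  simp [pvCounts]

lemma pvCounts_cons (col t : String) (T : List String) (he : t ≠ "") :
    pvCounts col (t :: T)
      = (if (pvParseB t).1 == col then (pvParseB t).2 :: pvCounts col T
         else pvCounts col T) := by
  simp only [pvCounts, List.filter_cons]
  rw [if_pos (show decide (t ≠ "") = true by simpa using he)]
  by_cases h : ((pvParseB t).1 == col) = true
  · simp [show (pvParseB t).1 = col by simpa using h]
  · simp [show ¬ (pvParseB t).1 = col by simpa using h]

-- main invariant: A's running maximum per color over the stripped tokens
lemma pvMain (T : List String) (d : PySem.Dict String Int) (col : String)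
    (h : ∀ t ∈ T, pvWf t) :
    (T.foldl pvStepA' d).getD col 0 = (pvCounts col T).foldl max (d.getD col 0) := by
  induction T generalizing d with
  | nil => simp [pvCounts]
  | cons t ts ih =>
    have hts : ∀ y ∈ ts, pvWf y := fun y hy => h y (List.mem_cons_of_mem _ hy)
    by_cases he : t = ""
    · subst he
      rw [pvCounts_cons_empty]
      simp only [List.foldl_cons, pvStepA']
      norm_num
      exact ih d hts
    · obtain ⟨a, b, hsp⟩ := h t (List.mem_cons_self) he
      have hstep : pvStepA' d t
          = d.insert b (max ((PySem.Int.ofStr? a).getD 0) (d.getD b 0)) := by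
        simp [pvStepA', he, hsp]
      have hpb : pvParseB t = (b, (PySem.Int.ofStr? a).getD 0) := by
        simp [pvParseB, hsp]
      rw [pvCounts_cons col t ts he, hpb]
      simp only [List.foldl_cons, hstep]
      rw [ih _ hts]
      by_cases hb : b = col
      · subst hb
        simp [max_comm]
      · have hbe : (b == col) = false := by simp [hb]
        simp [PySem.Dict.getD_insert, Ne.symm hb, hbe]

-- ===== VERDICT (by name: the statement is the Claim_ definition above) =====
theorem check_cubes_spec : Claim_equal_check_cubes := by
  intro s _ hpre
  unfold Spec_check_cubes
  have hA : check_cubes s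
      = (let d := (pvToks s).foldl pvStepA'
            (PySem.Dict.ofList [("red", 0), ("green", 0), ("blue", 0)])
         decide (d.getD "red" 0 ≤ 12 ∧ d.getD "green" 0 ≤ 13 ∧ d.getD "blue" 0 ≤ 14)) := by
    simp only [check_cubes, pvToks, List.foldl_flatMap, List.foldl_map]
    rfl
  have hwf : ∀ t ∈ pvToks s, pvWf t := by
    intro t ht hne
    simp only [pvToks, List.mem_flatMap, List.mem_map] at ht
    obtain ⟨part, hp, x, hx, rfl⟩ := ht
    obtain ⟨hlen, _, _⟩ := hpre part hp x hx hne
    obtain ⟨a, b, hq⟩ := List.length_eq_two.mp hlen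
    exact ⟨a, b, hq⟩
  have hB : check_cubes_alt s
      = (decide (PySem.List.maxD (pvCounts "red" (pvToks s)) id 0 ≤ 12)
         && (decide (PySem.List.maxD (pvCounts "green" (pvToks s)) id 0 ≤ 13)
         && (decide (PySem.List.maxD (pvCounts "blue" (pvToks s)) id 0 ≤ 14) && true))) := by
    simp only [check_cubes_alt, List.all_cons, List.all_nil, List.filterMap_map, pvToks, pvCounts]
    rfl
  rw [hA, hB]
  simp only [pvMain _ _ _ hwf]
  have hd0 : ∀ col ∈ (["red", "green", "blue"] : List String),
      (PySem.Dict.ofList [("red", (0 : Int)), ("green", 0), ("blue", 0)]).getD col 0 = 0 := by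
    decide
  rw [hd0 "red" (by decide), hd0 "green" (by decide), hd0 "blue" (by decide)]
  rw [show ∀ p q r : Prop, [Decidable p] → [Decidable q] → [Decidable r] →
      decide (p ∧ q ∧ r) = (decide p && (decide q && decide r)) from
    fun p q r _ _ _ => by simp]
  congr 1
  · exact decide_eq_decide.mpr (by rw [pvFoldlMax_le_iff, pvMaxD_le_iff _ _ (by norm_num)]; norm_num)
  congr 1
  · exact decide_eq_decide.mpr (by rw [pvFoldlMax_le_iff, pvMaxD_le_iff _ _ (by norm_num)]; norm_num)
  · rw [Bool.and_true]
    exact decide_eq_decide.mpr (by rw [pvFoldlMax_le_iff, pvMaxD_le_iff _ _ (by norm_num)]; norm_num)
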